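-- pv_equiv track=rewrite | github.com/yakinorinori/Static-Fingerprint-Recognition | main.py | dp_matching
-- ===== SOURCE A (Python) =====
-- def dp_matching(frame_data):
--     # 初期化
--     dp = [[0 for _ in range(len(frame_data[0]))] for _ in range(len(frame_data))]
--     dp[0] = frame_data[0]
--
--     # DPテーブルの更新
--     for i in range(1, len(frame_data)):
--         for j in range(len(frame_data[i])):
--             dp[i][j] = max(dp[i-1]) + frame_data[i][j]
--
--     # 後ろから追跡して最適なパスを求める
--     path = []
--     max_index = dp[-1].index(max(dp[-1]))
--     path.append(max_index)
--
--     for i in range(len(dp)-2, -1, -1):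
--         path.append(dp[i].index(max(dp[i])))
--
--     path = path[::-1]  # パスを逆順にする
--
--     return path
-- ===== SOURCE B (Python) =====
-- def dp_matching(frame_data):
--     # Every DP cell of a row is its frame entry plus one constant offset shared
--     # by the whole row, so the backtracked optimal path is just the per-row
--     # argmax (first occurrence of the row maximum).
--     return [row.index(max(row)) for row in frame_data]
-- ===== Notes on version B (the rewrite author's own statement) =====
-- stated objective: faster
-- what changed: Drops the DP table, the backtracking loop and the reversal entirely: each DP cell is its frame entry plus a row-constant offset, so B returns the per-row first-argmax list in one comprehension; Pre_ excludes inputs where A raises, inputs with an empty later row (A reads its zero-initialized table, B raises ValueError), and ragged frames containing an all-negative row, the only shapes where A's backtracked index can point past a short row's end at a preinitialized zero cell.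
-- outside the precondition, e.g. on dp_matching([[1, 2], [-5]]): A returns [1, 1], B returns [1, 0]; on dp_matching([[1], []]): A returns [0, 0], B raises ValueError
import Mathlib
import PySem

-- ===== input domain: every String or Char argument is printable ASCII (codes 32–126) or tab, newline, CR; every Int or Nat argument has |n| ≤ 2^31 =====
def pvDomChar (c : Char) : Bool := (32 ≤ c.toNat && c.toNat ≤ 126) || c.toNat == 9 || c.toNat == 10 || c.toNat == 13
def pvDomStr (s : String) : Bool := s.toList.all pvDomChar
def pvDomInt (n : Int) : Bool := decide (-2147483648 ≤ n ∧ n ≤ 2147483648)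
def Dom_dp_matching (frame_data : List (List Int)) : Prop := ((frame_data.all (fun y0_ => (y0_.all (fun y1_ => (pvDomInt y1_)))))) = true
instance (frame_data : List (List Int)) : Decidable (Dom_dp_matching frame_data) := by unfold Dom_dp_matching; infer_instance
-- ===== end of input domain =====

-- B drops A's DP table, backtracking loop and reversal: each DP cell is its frame
-- entry plus a row-constant offset, so the path is the per-row first-argmax list.


-- ===== PORT A =====
-- max(l) (total form; the default is only reached on an empty list, outside Pre_)
def pyMaxD (l : List Int) : Int := (PySem.List.max? l (fun y => y)).getD 0

-- l.index(max(l))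
def argmaxPy (l : List Int) : Int := (((PySem.List.index? l (pyMaxD l)).getD 0 : Nat) : Int)

def dpInner (c : Int) (row : List Int) (acc : List Int) : List Int :=
  (PySem.List.pyRange 0 (row.length : Int) 1).foldl
    (fun a j => PySem.List.pySetD a j (c + PySem.List.pyGetD row j 0)) acc

def backLoop (dp : List (List Int)) (path : List Int) : Nat → List Int
  | 0 => path
  | k + 1 => backLoop dp (path ++ [argmaxPy (dp.getD k [])]) k

def dp_matching (frame_data : List (List Int)) : List Int :=
  let n := frame_data.length
  let dp0 : List (List Int) :=
    (List.range n).map (fun _ => (List.range (frame_data.headD []).length).map (fun _ => (0 : Int)))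
  let dp0 := dp0.set 0 (frame_data.headD [])
  let dp := (PySem.List.pyRange 1 (n : Int) 1).foldl
    (fun dp i =>
      PySem.List.pySetD dp i
        (dpInner (pyMaxD (PySem.List.pyGetD dp (i - 1) []))
                 (PySem.List.pyGetD frame_data i [])
                 (PySem.List.pyGetD dp i []))) dp0
  let path : List Int := [argmaxPy (PySem.List.pyGetD dp (-1) [])]
  let path := backLoop dp path (dp.length - 1)
  path.reverse

-- ===== PORT B =====
-- [row.index(max(row)) for row in frame_data]
def dp_matching_alt (frame_data : List (List Int)) : List Int :=
  frame_data.map (fun row => (((PySem.List.index? row (pyMaxD row)).getD 0 : Nat) : Int))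

-- ===== PRECONDITION & SPEC =====
-- Pre_ excludes: inputs where A raises (empty frame, empty first row, a later row longer
-- than the first); inputs with an empty later row, on which A's path is read off the
-- zero-initialized table while B naturally raises ValueError; and ragged frames containing
-- an all-negative row, the only shapes on which A's backtracked index can point one past a
-- short row's end — at a zero cell of its preinitialized table rather than at any frame
-- entry — a corner no caller specifies; B returns the per-row argmax there.
def Pre_dp_matching (frame_data : List (List Int)) : Prop :=
  frame_data ≠ [] ∧
    (∀ row ∈ frame_data, row ≠ [] ∧ row.length ≤ (frame_data.headD []).length) ∧
    ((∀ row ∈ frame_data, row.length = (frame_data.headD []).length) ∨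
      (∀ row ∈ frame_data, ∃ x ∈ row, 0 ≤ x))
instance (frame_data : List (List Int)) : Decidable (Pre_dp_matching frame_data) := by
  unfold Pre_dp_matching; infer_instance

def pvWitness_dp_matching : List (List Int) := [[1, 2], [3, 4], [-5, 0], [5, 0]]

def Spec_dp_matching (frame_data : List (List Int)) (out : List Int) : Prop := out = dp_matching_alt frame_data
instance (frame_data : List (List Int)) (out : List Int) : Decidable (Spec_dp_matching frame_data out) := by unfold Spec_dp_matching; infer_instance

-- ===== CLAIM (what is proved, stated in full; the proofs are below) =====
def Claim_equal_dp_matching : Prop := ∀ (frame_data : List (List Int)), Dom_dp_matching frame_data → Pre_dp_matching frame_data → Spec_dp_matching frame_data (dp_matching frame_data)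

-- ===== LEMMAS AND PROOFS =====
theorem getD_set_eq (l : List (List Int)) (i k : Nat) (v : List Int) :
    (l.set i v).getD k [] = if k = i ∧ i < l.length then v else l.getD k [] := by
  simp only [List.getD_eq_getElem?_getD, List.getElem?_set]
  split_ifs with h1 h2 h3 <;> simp_all

theorem pyGetD_nonneg {α : Type} (xs : List α) (i : Int) (d : α) (h : 0 ≤ i) :
    PySem.List.pyGetD xs i d = xs.getD i.toNat d := by
  rw [show i = ((i.toNat : Nat) : Int) by omega, PySem.List.pyGetD_natCast, Int.toNat_natCast]

theorem setRange_eq (c : Int) (row : List Int) :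
    ∀ (m : Nat) (acc : List Int), m ≤ row.length → row.length ≤ acc.length →
    (List.range m).foldl (fun a k => a.set k (c + row.getD k 0)) acc
      = (row.take m).map (fun x => c + x) ++ acc.drop m := by
  intro m
  induction m with
  | zero => intro acc _ _; simp
  | succ m ih =>
    intro acc hm hlen
    rw [List.range_succ, List.foldl_append, List.foldl_cons, List.foldl_nil, ih acc (by omega) hlen]
    have hmr : m < row.length := by omega
    have hma : m < acc.length := by omega
    have hlt : ((row.take m).map (fun x => c + x)).length = m := by
      simp [List.length_take]; omega
    rw [List.set_append]
    simp only [hlt]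
    rw [if_neg (by omega)]
    rw [List.drop_eq_getElem_cons hma]
    simp only [Nat.sub_self, List.set_cons_zero]
    simp only [List.getD_eq_getElem?_getD, List.getElem?_eq_getElem hmr, Option.getD_some,
      List.map_take]
    rw [List.take_add_one, List.getElem?_map, List.getElem?_eq_getElem hmr]
    simp

def padRow (m : Nat) (c : Int) (row : List Int) : List Int :=
  row.map (fun x => c + x) ++ List.replicate (m - row.length) 0

theorem zrow_drop (m k : Nat) :
    ((List.range m).map (fun _ => (0 : Int))).drop k = List.replicate (m - k) 0 := by
  have h : (List.range m).map (fun _ => (0 : Int)) = List.replicate m 0 := by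
    apply List.eq_replicate_iff.mpr
    exact ⟨by simp, by intro b hb; obtain ⟨a, -, h⟩ := List.mem_map.mp hb; exact h.symm⟩
  rw [h, List.drop_replicate]

theorem dpInner_eq_pad (c : Int) (row : List Int) (m : Nat) (hm : row.length ≤ m) :
    dpInner c row ((List.range m).map (fun _ => (0 : Int))) = padRow m c row := by
  unfold dpInner
  rw [PySem.List.pyRange_one]
  simp only [Int.sub_zero, Int.toNat_natCast, List.foldl_map, Int.zero_add,
    PySem.List.pySetD_natCast, PySem.List.pyGetD_natCast]
  have := setRange_eq c row row.length ((List.range m).map (fun _ => (0 : Int))) le_rfl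
    (by simpa using hm)
  rw [List.take_length] at this
  rw [zrow_drop] at this
  unfold padRow
  simpa using this

theorem backLoop_eq (dp : List (List Int)) :
    ∀ (k : Nat) (path : List Int), k ≤ dp.length →
    backLoop dp path k = path ++ ((dp.take k).map (fun r => argmaxPy r)).reverse := by
  intro k
  induction k with
  | zero => intro path _; simp [backLoop]
  | succ k ih =>
    intro path hk
    have hkl : k < dp.length := by omega
    rw [backLoop, ih _ (by omega)]
    simp only [List.getD_eq_getElem?_getD, List.getElem?_eq_getElem hkl, Option.getD_some,
      List.append_assoc, List.singleton_append, List.map_take]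
    rw [List.take_add_one, List.getElem?_map, List.getElem?_eq_getElem hkl]
    simp

def effRows (m : Nat) : Int → List (List Int) → List (List Int)
  | _, [] => []
  | c, row :: rest => padRow m c row :: effRows m (pyMaxD (padRow m c row)) rest

theorem length_effRows (m : Nat) : ∀ (c : Int) (rows : List (List Int)),
    (effRows m c rows).length = rows.length := by
  intro c rows
  induction rows generalizing c with
  | nil => simp [effRows]
  | cons row rest ih => simp [effRows, ih]

theorem effRows_getD_succ (m : Nat) :
    ∀ (rows : List (List Int)) (c : Int) (k : Nat), k + 1 < rows.length →
    (effRows m c rows).getD (k+1) [] =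
      padRow m (pyMaxD ((effRows m c rows).getD k [])) (rows.getD (k+1) []) := by
  intro rows
  induction rows with
  | nil => intro c k hk; simp at hk
  | cons row rest ih =>
    intro c k hk
    cases k with
    | zero =>
      cases rest with
      | nil => simp at hk
      | cons r2 t2 => simp [effRows]
    | succ k =>
      have := ih (pyMaxD (padRow m c row)) k (by simpa using hk)
      simpa [effRows] using this

def DpInv (fd E : List (List Int)) (dp : List (List Int)) (t : Nat) : Prop :=
  dp.length = fd.length ∧
  (∀ k : Nat, k < t → dp.getD k [] = E.getD k []) ∧
  (∀ k : Nat, t ≤ k → k < fd.length →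
    dp.getD k [] = (List.range (fd.headD []).length).map (fun _ => (0 : Int)))

theorem loop_inv (fd E : List (List Int))
    (hrect : ∀ row ∈ fd, row.length ≤ (fd.headD []).length)
    (hE : ∀ k : Nat, k + 1 < fd.length →
      E.getD (k+1) [] = padRow (fd.headD []).length (pyMaxD (E.getD k [])) (fd.getD (k+1) [])) :
    ∀ (j : Nat) (i : Int) (dp : List (List Int)), 1 ≤ i → i + j = fd.length →
      DpInv fd E dp i.toNat →
      DpInv fd E ((PySem.List.pyRange i (fd.length : Int) 1).foldl
        (fun dp i =>
          PySem.List.pySetD dp i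
            (dpInner (pyMaxD (PySem.List.pyGetD dp (i - 1) []))
                     (PySem.List.pyGetD fd i [])
                     (PySem.List.pyGetD dp i []))) dp) fd.length := by
  intro j
  induction j with
  | zero =>
    intro i dp h1 hij hInv
    rw [PySem.List.pyRange_one_eq_nil (by omega), List.foldl_nil]
    have : i.toNat = fd.length := by omega
    rwa [this] at hInv
  | succ j ih =>
    intro i dp h1 hij hInv
    have hin : i < (fd.length : Int) := by omega
    rw [PySem.List.pyRange_one_cons hin, List.foldl_cons]
    obtain ⟨hlen, hdone, hzero⟩ := hInv
    have h0i : (0:Int) ≤ i := by omega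
    have hitn : i.toNat < fd.length := by omega
    have hit1 : 1 ≤ i.toNat := by omega
    have hz : PySem.List.pyGetD dp i []
        = (List.range (fd.headD []).length).map (fun _ => (0 : Int)) := by
      rw [pyGetD_nonneg _ _ _ h0i]; exact hzero i.toNat le_rfl hitn
    have hrowmem : fd.getD i.toNat [] ∈ fd := by
      rw [List.getD_eq_getElem?_getD, List.getElem?_eq_getElem hitn]
      simp [List.getElem_mem]
    have hrowlen : (fd.getD i.toNat []).length ≤ (fd.headD []).length := hrect _ hrowmem
    have hprev : pyMaxD (PySem.List.pyGetD dp (i - 1) [])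
        = pyMaxD (E.getD (i.toNat - 1) []) := by
      rw [pyGetD_nonneg _ _ _ (by omega), show (i - 1).toNat = i.toNat - 1 by omega,
        hdone (i.toNat - 1) (by omega)]
    set c := pyMaxD (PySem.List.pyGetD dp (i - 1) []) with hc
    have hinner : dpInner c (PySem.List.pyGetD fd i []) (PySem.List.pyGetD dp i [])
        = E.getD i.toNat [] := by
      rw [pyGetD_nonneg fd _ _ h0i, hz, dpInner_eq_pad c _ _ hrowlen]
      rw [hprev]
      have := hE (i.toNat - 1) (by omega)
      rw [show i.toNat - 1 + 1 = i.toNat by omega] at this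
      exact this.symm
    have hset : PySem.List.pySetD dp i
          (dpInner c (PySem.List.pyGetD fd i []) (PySem.List.pyGetD dp i []))
        = dp.set i.toNat (E.getD i.toNat []) := by
      rw [hinner, PySem.List.pySetD_of_nonneg _ _ h0i]
    rw [hset]
    have hnext : DpInv fd E (dp.set i.toNat (E.getD i.toNat [])) (i+1).toNat := by
      refine ⟨by simp [hlen], ?_, ?_⟩
      · intro k hk
        rw [getD_set_eq]
        by_cases hki : k = i.toNat
        · subst hki; rw [if_pos ⟨rfl, by omega⟩]
        · rw [if_neg (fun h => hki h.1)]; exact hdone k (by omega)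
      · intro k hk1 hk2
        rw [getD_set_eq, if_neg (fun h => absurd h.1 (by omega))]
        exact hzero k (by omega) hk2
    exact ih (i+1) _ (by omega) (by push_cast at hij ⊢; omega) hnext

theorem map_add_foldl_max (c : Int) (t : List Int) :
    ∀ x : Int, (t.map (fun y => c + y)).foldl max (c + x) = c + t.foldl max x := by
  induction t with
  | nil => intro x; simp
  | cons h t ih =>
    intro x
    simp only [List.map_cons, List.foldl_cons]
    rw [show max (c + x) (c + h) = c + max x h by omega, ih]

theorem index?_map_add (c : Int) (l : List Int) :
    ∀ v : Int, PySem.List.index? (l.map (fun y => c + y)) (c + v) = PySem.List.index? l v := by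
  induction l with
  | nil => intro v; simp [PySem.List.index?]
  | cons h t ih =>
    intro v
    by_cases hv : h = v
    · subst hv
      simp only [List.map_cons]
      rw [PySem.List.index?_cons_self, PySem.List.index?_cons_self]
    · simp only [List.map_cons]
      rw [PySem.List.index?_cons_of_ne _ (show (c + h) ≠ (c + v) by omega),
        PySem.List.index?_cons_of_ne _ hv, ih]

theorem argmax_shift (c : Int) (row : List Int) (h : row ≠ []) :
    argmaxPy (row.map (fun x => c + x)) = argmaxPy row := by
  obtain ⟨x, t, rfl⟩ : ∃ x t, row = x :: t := by
    cases row with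
    | nil => exact absurd rfl h
    | cons a b => exact ⟨a, b, rfl⟩
  unfold argmaxPy pyMaxD
  simp only [List.map_cons]
  rw [PySem.List.max?_id_cons, PySem.List.max?_id_cons]
  simp only [Option.getD_some]
  rw [map_add_foldl_max, show ((c + x) :: t.map (fun y => c + y)) = (x :: t).map (fun y => c + y)
      from rfl, index?_map_add]

theorem foldl_max_replicate_zero (M : Int) (hM : 0 ≤ M) :
    ∀ k : Nat, (List.replicate k (0 : Int)).foldl max M = M := by
  intro k
  induction k with
  | zero => simp
  | succ k ih => rw [List.replicate_succ, List.foldl_cons, max_eq_left hM, ih]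

theorem pyMaxD_mem (l : List Int) (h : l ≠ []) : pyMaxD l ∈ l := by
  obtain ⟨x, t, rfl⟩ : ∃ x t, l = x :: t := by
    cases l with
    | nil => exact absurd rfl h
    | cons a b => exact ⟨a, b, rfl⟩
  exact PySem.List.max?_mem (by rw [pyMaxD, PySem.List.max?_id_cons]; rfl)

theorem pyMaxD_append_replicate (x : Int) (t : List Int) (k : Nat)
    (h : 0 ≤ pyMaxD (x :: t)) :
    pyMaxD ((x :: t) ++ List.replicate k 0) = pyMaxD (x :: t) := by
  have hx : pyMaxD (x :: t) = t.foldl max x := by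
    rw [pyMaxD, PySem.List.max?_id_cons]; rfl
  rw [List.cons_append, pyMaxD, PySem.List.max?_id_cons, Option.getD_some,
    List.foldl_append, ← hx, foldl_max_replicate_zero _ h, hx]

theorem pyMaxD_map_add (c : Int) (x : Int) (t : List Int) :
    pyMaxD ((x :: t).map (fun y => c + y)) = c + pyMaxD (x :: t) := by
  simp only [List.map_cons]
  rw [pyMaxD, pyMaxD, PySem.List.max?_id_cons, PySem.List.max?_id_cons,
    Option.getD_some, Option.getD_some, map_add_foldl_max]

theorem argmax_pad_nonneg (m : Nat) (c : Int) (row : List Int) (hne : row ≠ [])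
    (hc : 0 ≤ c) (hM : 0 ≤ pyMaxD row) :
    argmaxPy (padRow m c row) = argmaxPy row ∧ pyMaxD (padRow m c row) = c + pyMaxD row := by
  obtain ⟨x, t, rfl⟩ : ∃ x t, row = x :: t := by
    cases row with
    | nil => exact absurd rfl hne
    | cons a b => exact ⟨a, b, rfl⟩
  have hmap : (x :: t).map (fun y => c + y) = (c + x) :: t.map (fun y => c + y) := rfl
  have hmmax : pyMaxD ((x :: t).map (fun y => c + y)) = c + pyMaxD (x :: t) :=
    pyMaxD_map_add c x t
  have hMc : 0 ≤ pyMaxD ((x :: t).map (fun y => c + y)) := by omega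
  have hpadmax : pyMaxD (padRow m c (x :: t)) = c + pyMaxD (x :: t) := by
    unfold padRow
    rw [hmap, pyMaxD_append_replicate _ _ _ (by rw [← hmap]; exact hMc), ← hmap, hmmax]
  refine ⟨?_, hpadmax⟩
  unfold argmaxPy
  rw [hpadmax]
  unfold padRow
  have hmem : c + pyMaxD (x :: t) ∈ (x :: t).map (fun y => c + y) := by
    rw [← hmmax]
    exact pyMaxD_mem _ (by simp)
  rw [PySem.List.index?_append_of_mem _ hmem, index?_map_add]

theorem effRows_argmax (m : Nat) :
    ∀ (rows : List (List Int)) (c : Int),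
    (∀ row ∈ rows, row ≠ [] ∧ row.length ≤ m) →
    ((∀ row ∈ rows, row.length = m) ∨ (0 ≤ c ∧ ∀ row ∈ rows, 0 ≤ pyMaxD row)) →
    (effRows m c rows).map (fun r => argmaxPy r) = rows.map (fun r => argmaxPy r) := by
  intro rows
  induction rows with
  | nil => intro c _ _; simp [effRows]
  | cons row rest ih =>
    intro c hsh hcase
    obtain ⟨hne, hle⟩ := hsh row (by simp)
    rcases hcase with hrect | ⟨hc, hnn⟩
    · have hr : row.length = m := hrect row (by simp)
      have hpad : padRow m c row = row.map (fun x => c + x) := by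
        unfold padRow; rw [hr]; simp
      simp only [effRows, List.map_cons]
      rw [hpad, argmax_shift c row hne,
        ih _ (fun r hrm => hsh r (by simp [hrm]))
          (Or.inl (fun r hrm => hrect r (by simp [hrm])))]
    · obtain ⟨hax, hmx⟩ := argmax_pad_nonneg m c row hne hc (hnn row (by simp))
      simp only [effRows, List.map_cons]
      rw [hax,
        ih _ (fun r hrm => hsh r (by simp [hrm]))
          (Or.inr ⟨by rw [hmx]; have := hnn row (by simp); omega,
            fun r hrm => hnn r (by simp [hrm])⟩)]

theorem pyMaxD_nonneg_of_exists (l : List Int) (h : ∃ x ∈ l, 0 ≤ x) : 0 ≤ pyMaxD l := by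
  obtain ⟨x, hx, hx0⟩ := h
  obtain ⟨a, t, rfl⟩ : ∃ a t, l = a :: t := by
    cases l with
    | nil => simp at hx
    | cons a b => exact ⟨a, b, rfl⟩
  have hmax : PySem.List.max? (a :: t) (fun y => y) = some (pyMaxD (a :: t)) := by
    rw [pyMaxD, PySem.List.max?_id_cons]; rfl
  have := PySem.List.max?_isMax hmax x hx
  omega

theorem dp_main (fd : List (List Int)) (hpre : Pre_dp_matching fd) :
    dp_matching fd = dp_matching_alt fd := by
  obtain ⟨hne, hsh, hcase⟩ := hpre
  have hrow0 : fd.headD [] ≠ [] := by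
    cases fd with
    | nil => exact absurd rfl hne
    | cons a t => exact (hsh a (by simp)).1
  have hrect : ∀ row ∈ fd, row.length ≤ (fd.headD []).length :=
    fun row hr => (hsh row hr).2
  have hn : 0 < fd.length := List.length_pos_of_ne_nil hne
  obtain ⟨r0, tail, rfl⟩ : ∃ r0 tail, fd = r0 :: tail := by
    cases fd with
    | nil => exact absurd rfl hne
    | cons a t => exact ⟨a, t, rfl⟩
  set fd := r0 :: tail with hfd
  have hhead : fd.headD [] = r0 := by rw [hfd]; rfl
  set m := (fd.headD []).length with hm
  set E : List (List Int) := r0 :: effRows m (pyMaxD r0) tail with hE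
  have hElen : E.length = fd.length := by
    rw [hE, hfd]; simp [length_effRows]
  have hEgetD0 : E.getD 0 [] = fd.headD [] := by rw [hE, hhead]; rfl
  have hEsucc : ∀ k : Nat, k + 1 < fd.length →
      E.getD (k+1) [] = padRow m (pyMaxD (E.getD k [])) (fd.getD (k+1) []) := by
    intro k hk
    cases k with
    | zero =>
      cases tail with
      | nil => rw [hfd] at hk; simp at hk
      | cons r2 t2 => rw [hE, hfd]; simp [effRows]
    | succ k =>
      have hk' : k + 1 < tail.length := by rw [hfd] at hk; simpa using hk
      have := effRows_getD_succ m tail (pyMaxD r0) k hk'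
      rw [hE, hfd]
      simpa using this
  -- ===== A's side =====
  unfold dp_matching
  simp only []
  set dp0 := (((List.range fd.length).map
      (fun _ => (List.range (fd.headD []).length).map (fun _ => (0 : Int)))).set 0
      (fd.headD [])) with hdp0
  have hinv0 : DpInv fd E dp0 (1 : Int).toNat := by
    refine ⟨by simp [hdp0], ?_, ?_⟩
    · intro k hk
      have hk0 : k = 0 := by omega
      subst hk0
      rw [hdp0, getD_set_eq, if_pos ⟨rfl, by simpa using hn⟩, hEgetD0]
    · intro k hk1 hk2
      rw [hdp0, getD_set_eq, if_neg (fun h => by omega)]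
      rw [PySem.List.getD_map_range _ _ _ _ hk2]
  have hloop := loop_inv fd E hrect hEsucc
    (fd.length - 1) 1 dp0 (by omega) (by omega) hinv0
  set dp1 := (PySem.List.pyRange 1 (fd.length : Int) 1).foldl
    (fun dp i =>
      PySem.List.pySetD dp i
        (dpInner (pyMaxD (PySem.List.pyGetD dp (i - 1) []))
                 (PySem.List.pyGetD fd i [])
                 (PySem.List.pyGetD dp i []))) dp0 with hdp1
  obtain ⟨hlen1, hsame, -⟩ := hloop
  have hdne : dp1 ≠ [] := by
    intro h; rw [h] at hlen1; simp at hlen1; omega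
  have hdpE : dp1 = E := by
    apply List.ext_getElem (by omega)
    intro k h1 h2
    have hk : k < fd.length := by omega
    have := hsame k hk
    rw [List.getD_eq_getElem?_getD, List.getElem?_eq_getElem h1,
      List.getD_eq_getElem?_getD, List.getElem?_eq_getElem h2] at this
    simpa using this
  rw [PySem.List.pyGetD_neg_one _ _ hdne, List.getLast_eq_getElem hdne]
  rw [backLoop_eq dp1 (dp1.length - 1) _ (by omega)]
  rw [List.reverse_append, List.reverse_reverse, List.reverse_singleton]
  have htake : (dp1.take (dp1.length - 1)).map (fun r => argmaxPy r)
      ++ [argmaxPy dp1[dp1.length - 1]] = dp1.map (fun r => argmaxPy r) := by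
    rw [← List.getLast_eq_getElem hdne,
      show ([argmaxPy (dp1.getLast hdne)] : List Int)
        = List.map (fun r => argmaxPy r) [dp1.getLast hdne] from rfl,
      ← List.map_append,
      show List.take (dp1.length - 1) dp1 = dp1.dropLast from List.dropLast_eq_take.symm,
      List.dropLast_append_getLast hdne]
  rw [htake, hdpE]
  -- ===== B's side =====
  have htail : ∀ row ∈ tail, row ≠ [] ∧ row.length ≤ m := by
    intro row hr; exact hsh row (by rw [hfd]; simp [hr])
  have hcase' : (∀ row ∈ tail, row.length = m) ∨
      (0 ≤ pyMaxD r0 ∧ ∀ row ∈ tail, 0 ≤ pyMaxD row) := by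
    rcases hcase with hl | hr
    · exact Or.inl (fun row hrm => hl row (by rw [hfd]; simp [hrm]))
    · refine Or.inr ⟨pyMaxD_nonneg_of_exists r0 (hr r0 (by rw [hfd]; simp)), ?_⟩
      intro row hrm
      exact pyMaxD_nonneg_of_exists row (hr row (by rw [hfd]; simp [hrm]))
  unfold dp_matching_alt
  rw [hE]
  simp only [List.map_cons]
  rw [effRows_argmax m tail (pyMaxD r0) htail hcase']
  rw [hfd]
  rfl

-- ===== VERDICT (by name: the statement is the Claim_ definition above) =====
theorem dp_matching_spec : Claim_equal_dp_matching := by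
  intro frame_data _ hpre
  unfold Spec_dp_matching
  exact dp_main frame_data hpre
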